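-- pv_equiv track=rewrite | github.com/cambridge-cares/TheWorldAvatar | MARIE_SEQ2SEQ/chatbot/generate_data/example_generator.py | _get_argnames
-- ===== SOURCE A (Python) =====
-- from typing import Any, Dict, List
--
-- def _get_argnames(text: str):
--     """Returns a set of argument names used in an f-string."""
--     idx = 0
--     arg_names: List[str] = []
--
--     while idx < len(text):
--         if text[idx] != "{":
--             idx += 1
--             continue
--
--         if idx + 1 < len(text) and text[idx + 1] == "{":
--             idx += 2
--             continue
--         else:
--             open_bracket_idx = idx
--             while idx < len(text) and text[idx] != "}":
--                 idx += 1
--             if idx == len(text):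
--                 raise ValueError("Text contains unclosed curly braces: " + text)
--             arg_names.append(text[open_bracket_idx + 1 : idx])
--
--     arg_names = list(set(arg_names))
--     arg_names.sort()
--
--     return arg_names
-- ===== SOURCE B (Python) =====
-- def _get_argnames(text: str):
--     """Returns a set of argument names used in an f-string."""
--     chunks = text.split("}")
--     if _field(chunks[-1]) is not None:
--         raise ValueError("Text contains unclosed curly braces: " + text)
--     names = {name for name in map(_field, chunks[:-1]) if name is not None}
--     return sorted(names)
--
--
-- def _field(chunk):
--     """Name of the argument field opened in this '}'-free chunk: the text after
--     the first odd-length run of '{' (even runs are escaped pairs), or None."""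
--     pieces = chunk.split("{")[1:]
--     while pieces:
--         run = 1
--         while run < len(pieces) and pieces[run - 1] == "":
--             run += 1
--         if run % 2 == 1:
--             return "{".join(pieces[run - 1:])
--         pieces = pieces[run:]
--     return None
-- ===== Notes on version B (the rewrite author's own statement) =====
-- stated objective: faster
-- what changed: Replaces A's single-pass character automaton by a staged decomposition: split the text on '}' into chunks, in each chunk find the field opened by the first odd-length run of '{' via run-length parity over chunk.split('{'), collect the sorted set of names, and detect the unclosed-brace error as a field in the final chunk.
import Mathlib
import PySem

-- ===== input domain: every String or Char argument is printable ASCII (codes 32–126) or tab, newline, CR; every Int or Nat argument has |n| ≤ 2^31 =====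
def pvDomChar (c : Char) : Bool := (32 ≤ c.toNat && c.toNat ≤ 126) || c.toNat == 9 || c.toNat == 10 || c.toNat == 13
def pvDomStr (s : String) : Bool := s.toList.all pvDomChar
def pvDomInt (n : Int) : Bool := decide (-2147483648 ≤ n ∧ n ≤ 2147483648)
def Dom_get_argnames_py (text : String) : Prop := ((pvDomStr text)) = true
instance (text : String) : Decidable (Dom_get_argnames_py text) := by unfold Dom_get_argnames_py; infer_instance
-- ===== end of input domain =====

-- B replaces A's per-character index scanner by a staged decomposition (split on '}', run-length
-- parity of '{' runs per chunk); equivalence is about RETURN values (outside Pre_ both raise ValueError).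


-- ===== PORT A =====
-- inner while of A: `while idx < len(text) and text[idx] != "}": idx += 1`; returns the final idx
def pvInnerA (cs : List Char) (k : Nat) : Nat :=
  if h : k < cs.length then (if cs[k] = '}' then k else pvInnerA cs (k + 1)) else k
termination_by cs.length - k

-- cited by pvLoopA's decreasing_by
theorem pvInnerA_ge (cs : List Char) (k : Nat) : k ≤ pvInnerA cs k := by
  fun_induction pvInnerA cs k with
  | case1 k h he => omega
  | case2 k h hne ih => omega
  | case3 k h => omega

-- outer while of A; none = the ValueError branch; text[a:b] (0 ≤ a ≤ b ≤ len) is (drop a).take (b-a)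
def pvLoopA (cs : List Char) (idx : Nat) (acc : List String) : Option (List String) :=
  if h : idx < cs.length then
    if cs[idx] ≠ '{' then pvLoopA cs (idx + 1) acc
    else if idx + 1 < cs.length ∧ cs[idx + 1]? = some '{' then pvLoopA cs (idx + 2) acc
    else
      let j := pvInnerA cs idx
      if j = cs.length then none   -- Python: raise ValueError (unclosed braces)
      else pvLoopA cs j (acc ++ [String.ofList ((cs.drop (idx + 1)).take (j - (idx + 1)))])
  else some acc
termination_by cs.length - idx
decreasing_by
  · omega
  · omega
  · have h1 : idx + 1 ≤ pvInnerA cs idx := by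
      have hb : ¬ cs[idx] = '}' := by simp_all
      rw [pvInnerA, dif_pos h, if_neg hb]
      exact pvInnerA_ge cs (idx + 1)
    omega

-- list(set(l)) followed by .sort() is sorted(set(l))
def get_argnames_py (text : String) : List String :=
  match pvLoopA text.toList 0 [] with
  | none => []   -- Python raises ValueError here; these inputs are excluded by Pre_
  | some acc => PySem.List.sorted (PySem.Set.ofList acc) (fun x => x) false

-- ===== PORT B =====
-- Python's str.split(sep) for a ONE-character sep, ported by hand (exact for any characters)
def pvSplitCh (sep : Char) (cs : List Char) : List (List Char) :=
  match cs with
  | [] => [[]]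
  | a :: r =>
    if a = sep then [] :: pvSplitCh sep r
    else
      match pvSplitCh sep r with
      | [] => [[a]]   -- unreachable: pvSplitCh never returns []
      | h :: t => (a :: h) :: t

-- inner while of _field: `while run < len(pieces) and pieces[run-1] == "": run += 1`
def pvRun (pieces : List (List Char)) (run : Nat) : Nat :=
  if run < pieces.length ∧ pieces[run - 1]! = [] then pvRun pieces (run + 1) else run
termination_by pieces.length - run

-- cited by pvScanRuns's decreasing_by
theorem pvRun_ge (pieces : List (List Char)) (k : Nat) : k ≤ pvRun pieces k := by
  fun_induction pvRun pieces k with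
  | case1 k h ih => omega
  | case2 k h => omega

-- outer while of _field, recursion on the shrinking pieces list; "{".join is List.intercalate ['{']
def pvScanRuns (pieces : List (List Char)) : Option (List Char) :=
  if hp : pieces = [] then none
  else
    let run := pvRun pieces 1
    if run % 2 = 1 then some (List.intercalate ['{'] (pieces.drop (run - 1)))
    else pvScanRuns (pieces.drop run)
termination_by pieces.length
decreasing_by
  have h1 : 1 ≤ pvRun pieces 1 := pvRun_ge pieces 1
  have h2 : 0 < pieces.length := List.length_pos_iff.mpr hp
  simp [List.length_drop]
  omega

-- _field(chunk): pieces = chunk.split("{")[1:], then run-parity scan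
def pvFieldB (chunk : List Char) : Option (List Char) :=
  pvScanRuns ((pvSplitCh '{' chunk).drop 1)

def get_argnames_py_alt (text : String) : List String :=
  let chunks := pvSplitCh '}' text.toList   -- text.split("}"); never empty, chunks[-1] = getLastD
  if (pvFieldB (chunks.getLastD [])).isSome then []   -- Python raises ValueError here; excluded by Pre_
  else
    PySem.List.sorted
      (PySem.Set.ofList ((chunks.dropLast.filterMap pvFieldB).map String.ofList)) (fun x => x) false

-- ===== PRECONDITION & SPEC =====
-- Pre_ excludes exactly the inputs on which Python A raises ValueError: those whose suffix after the
-- last closing brace contains an odd-length maximal run of opening braces (a field opened, never closed).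
def Pre_get_argnames_py (text : String) : Prop :=
  (((text.toList.reverse.takeWhile (fun c => c ≠ '}')).splitOnP (fun c => c ≠ '{')).all
    (fun r => r.length % 2 == 0)) = true
instance (text : String) : Decidable (Pre_get_argnames_py text) := by
  unfold Pre_get_argnames_py; infer_instance

def pvWitness_get_argnames_py : String := "x{a} {{e}} {b}{a}"

def Spec_get_argnames_py (text : String) (out : List String) : Prop := out = get_argnames_py_alt text
instance (text : String) (out : List String) : Decidable (Spec_get_argnames_py text out) := by
  unfold Spec_get_argnames_py; infer_instance

-- ===== CLAIM (what is proved, stated in full; the proofs are below) =====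
def Claim_equal_get_argnames_py : Prop :=
  ∀ (text : String), Dom_get_argnames_py text → Pre_get_argnames_py text →
    Spec_get_argnames_py text (get_argnames_py text)

-- ===== LEMMAS AND PROOFS =====

-- structural reformulation of A's scanner (names at char level, in capture order)
def pvScanA (cs : List Char) : Option (List (List Char)) :=
  match cs with
  | [] => some []
  | a :: rest =>
    if a = '{' then
      if rest.head? = some '{' then pvScanA rest.tail
      else
        match hd : rest.dropWhile (· ≠ '}') with
        | [] => none
        | _ :: r' => (pvScanA r').map (rest.takeWhile (· ≠ '}') :: ·)
    else pvScanA rest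
termination_by cs.length
decreasing_by
  · cases rest <;> simp_all
  · have : (List.dropWhile (fun x => decide ¬x = '}') rest).length ≤ rest.length :=
      List.length_dropWhile_le _ rest
    rw [hd] at this; simp at this ⊢; omega
  · simp

-- char-level field of a '}'-free chunk: text after the first unescaped '{', if any
def pvFieldC (cs : List Char) : Option (List Char) :=
  match cs with
  | [] => none
  | a :: rest =>
    if a = '{' then
      if rest.head? = some '{' then pvFieldC rest.tail else some rest
    else pvFieldC rest
termination_by cs.length
decreasing_by
  · cases rest <;> simp_all
  · simp

-- ---- A side: pvInnerA / pvLoopA reduced to the structural scanner pvScanA ----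

-- the two elaborations of the Python predicate `c != '}'` are definitionally equal
theorem pvP1 : (fun x : Char => !decide (x = '}')) = (fun x : Char => decide (x ≠ '}')) := by
  funext x; rw [decide_not]

theorem pvInnerA_takeWhile (cs : List Char) (k : Nat) :
    pvInnerA cs k = k + ((cs.drop k).takeWhile (· ≠ '}')).length := by
  fun_induction pvInnerA cs k with
  | case1 k h he => rw [List.drop_eq_getElem_cons h]; simp [he]
  | case2 k h hne ih =>
    rw [List.drop_eq_getElem_cons h]
    simp only [List.takeWhile_cons]
    rw [if_pos (by simpa using hne)]
    simp only [List.length_cons]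
    omega
  | case3 k h => rw [List.drop_eq_nil_of_le (by omega)]; simp

theorem pvScanA_nil : pvScanA [] = some [] := by simp [pvScanA]

theorem pvScanA_skip (a : Char) (rest : List Char) (ha : a ≠ '{') :
    pvScanA (a :: rest) = pvScanA rest := by
  rw [pvScanA]; simp [ha]

theorem pvScanA_esc (r : List Char) : pvScanA ('{' :: '{' :: r) = pvScanA r := by
  rw [pvScanA]; simp

theorem pvScanA_open_none (rest : List Char) (hh : rest.head? ≠ some '{')
    (hd : rest.dropWhile (· ≠ '}') = []) : pvScanA ('{' :: rest) = none := by
  rw [pvScanA, if_pos rfl, if_neg hh]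
  split
  · rfl
  · rename_i b r' heq
    rw [show (fun x => decide ¬x = '}') = (fun x => decide (x ≠ '}')) from rfl] at heq
    rw [hd] at heq
    cases heq

theorem pvScanA_open_some (rest : List Char) (b : Char) (r' : List Char)
    (hh : rest.head? ≠ some '{') (hd : rest.dropWhile (· ≠ '}') = b :: r') :
    pvScanA ('{' :: rest) = (pvScanA r').map (rest.takeWhile (· ≠ '}') :: ·) := by
  rw [pvScanA, if_pos rfl, if_neg hh]
  split
  · rename_i heq
    rw [show (fun x => decide ¬x = '}') = (fun x => decide (x ≠ '}')) from rfl] at heq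
    rw [hd] at heq
    cases heq
  · rename_i b2 r2 heq
    rw [show (fun x => decide ¬x = '}') = (fun x => decide (x ≠ '}')) from rfl] at heq
    rw [hd] at heq
    cases heq
    rfl

theorem pvLoopA_scanA (cs : List Char) (idx : Nat) (acc : List String) :
    pvLoopA cs idx acc =
      (pvScanA (cs.drop idx)).map (fun ns => acc ++ ns.map String.ofList) := by
  fun_induction pvLoopA cs idx acc with
  | case1 idx acc h hne ih =>
    rw [ih, List.drop_eq_getElem_cons h, pvScanA_skip _ _ (by simpa using hne)]
  | case2 idx acc h hne hcond ih =>
    obtain ⟨h1, h2⟩ := hcond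
    have hb : cs[idx] = '{' := by simpa using hne
    rw [ih, List.drop_eq_getElem_cons h, hb]
    have hhd : (cs.drop (idx + 1)).head? = some '{' := by rw [List.head?_drop]; exact h2
    rcases hcs : cs.drop (idx + 1) with _ | ⟨x, xs⟩
    · rw [hcs] at hhd; simp at hhd
    · rw [hcs] at hhd
      simp only [List.head?_cons, Option.some.injEq] at hhd
      subst hhd
      rw [pvScanA_esc]
      have : cs.drop (idx + 2) = xs := by
        have h2 : (cs.drop (idx + 1)).tail = cs.drop (idx + 1 + 1) := List.tail_drop
        rw [hcs] at h2
        simpa using h2.symm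
      rw [this]
  | case3 idx acc h hne hcond j hj =>
    -- j = pvInnerA cs idx = cs.length: unclosed braces, both sides none
    have hb : cs[idx] = '{' := by simpa using hne
    have hj' : pvInnerA cs idx = pvInnerA cs (idx + 1) := by
      rw [pvInnerA, dif_pos h, if_neg (by rw [hb]; decide)]
    have hlen := pvInnerA_takeWhile cs (idx + 1)
    have hdw : (cs.drop (idx + 1)).dropWhile (· ≠ '}') = [] := by
      have hsum : ((cs.drop (idx+1)).takeWhile (· ≠ '}')).length + ((cs.drop (idx+1)).dropWhile (· ≠ '}')).length = (cs.drop (idx+1)).length := by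
        rw [← List.length_append, List.takeWhile_append_dropWhile]
      rw [List.length_drop] at hsum
      have : pvInnerA cs idx = cs.length := hj
      rw [hj', hlen] at this
      have := List.eq_nil_of_length_eq_zero (by omega : ((cs.drop (idx+1)).dropWhile (· ≠ '}')).length = 0)
      exact this
    have hhd : (cs.drop (idx + 1)).head? ≠ some '{' := by
      rw [List.head?_drop]
      intro hx
      have h1 : idx + 1 < cs.length := by
        by_contra h1
        rw [List.getElem?_eq_none (by omega)] at hx
        simp at hx
      exact hcond ⟨h1, hx⟩
    rw [List.drop_eq_getElem_cons h, hb, pvScanA_open_none _ hhd hdw]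
    rfl
  | case4 idx acc h hne hcond j hj ih =>
    have hb : cs[idx] = '{' := by simpa using hne
    have hj' : pvInnerA cs idx = pvInnerA cs (idx + 1) := by
      rw [pvInnerA, dif_pos h, if_neg (by rw [hb]; decide)]
    set rest := cs.drop (idx + 1) with hrest
    set T := rest.takeWhile (· ≠ '}') with hT
    have hjval : j = idx + 1 + T.length := by
      show pvInnerA cs idx = _
      rw [hj', pvInnerA_takeWhile]
    have hidx1 : idx + 1 ≤ cs.length := by omega
    have hjlen : j < cs.length := by
      rcases Nat.lt_or_ge j cs.length with h1 | h1
      · exact h1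
      · exfalso
        have hle : pvInnerA cs (idx+1) ≤ cs.length := by
          rw [pvInnerA_takeWhile]
          have htw : ((cs.drop (idx+1)).takeWhile (· ≠ '}')).length ≤ (cs.drop (idx+1)).length :=
            List.IsPrefix.length_le (List.takeWhile_prefix _)
          have hld : (cs.drop (idx+1)).length = cs.length - (idx+1) := List.length_drop
          omega
        rw [← hj'] at hle
        exact hj (by omega)
    have hdw : rest.dropWhile (· ≠ '}') = cs.drop j := by
      have h1 : rest = T ++ rest.dropWhile (· ≠ '}') := (List.takeWhile_append_dropWhile).symm
      have h2 : cs.drop j = rest.drop T.length := by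
        rw [hrest, List.drop_drop, hjval]
      rw [h2]
      conv_lhs => rw [show rest.dropWhile (· ≠ '}') = (T ++ rest.dropWhile (· ≠ '}')).drop T.length by rw [List.drop_left]]
      rw [← h1]
    have hcsj : cs.drop j = cs[j] :: cs.drop (j + 1) := List.drop_eq_getElem_cons hjlen
    have hjch : cs[j] = '}' := by
      have h0 := List.head?_dropWhile_not (fun x => decide (x ≠ '}')) rest
      rw [hdw, hcsj] at h0
      simp only [List.head?_cons] at h0
      simpa using h0
    have hhd : rest.head? ≠ some '{' := by
      rw [hrest, List.head?_drop]
      intro hx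
      have h1 : idx + 1 < cs.length := by
        by_contra h1
        rw [List.getElem?_eq_none (by omega)] at hx
        simp at hx
      exact hcond ⟨h1, hx⟩
    have hname : (cs.drop (idx + 1)).take (j - (idx + 1)) = T := by
      rw [← hrest, hjval]
      have : idx + 1 + T.length - (idx + 1) = T.length := by omega
      rw [this]
      conv_lhs => rw [show rest = T ++ rest.dropWhile (· ≠ '}') from (List.takeWhile_append_dropWhile).symm]
      exact List.take_left
    rw [ih, List.drop_eq_getElem_cons h, hb,
        pvScanA_open_some rest cs[j] (cs.drop (j+1)) hhd (by rw [hdw, hcsj]),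
        show pvScanA (cs.drop j) = pvScanA (cs.drop (j+1)) by
          rw [hcsj, pvScanA_skip _ _ (by rw [hjch]; decide)]]
    rw [hname]
    have hTT : List.takeWhile (fun x => !decide (x = '}')) rest = T := by rw [pvP1]
    cases pvScanA (cs.drop (j + 1)) <;> simp [hTT]
  | case5 idx acc h =>
    rw [List.drop_eq_nil_of_le (by omega), pvScanA_nil]
    simp

-- ---- fieldC: unfolding lemmas ----

theorem pvFieldC_skip (a : Char) (rest : List Char) (ha : a ≠ '{') :
    pvFieldC (a :: rest) = pvFieldC rest := by rw [pvFieldC]; simp [ha]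

theorem pvFieldC_esc (r : List Char) : pvFieldC ('{' :: '{' :: r) = pvFieldC r := by
  rw [pvFieldC]; simp

theorem pvFieldC_open (rest : List Char) (hh : rest.head? ≠ some '{') :
    pvFieldC ('{' :: rest) = some rest := by
  rw [pvFieldC]; simp [hh]

-- ---- L1 / L1b: one '}'-free chunk processed by the scanner ----

theorem pvScanA_chunk (c rest : List Char) (hc : ∀ a ∈ c, a ≠ '}') :
    pvScanA (c ++ '}' :: rest) =
      match pvFieldC c with
      | none => pvScanA rest
      | some nm => (pvScanA rest).map (nm :: ·) := by
  fun_induction pvFieldC c with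
  | case1 => rw [List.nil_append, pvScanA_skip _ _ (by decide)]
  | case2 r1 hh ih =>
    rcases r1 with _ | ⟨x, xs⟩
    · simp at hh
    · simp only [List.head?_cons, Option.some.injEq] at hh
      subst hh
      simp only [List.tail_cons] at ih ⊢
      rw [List.cons_append, List.cons_append, pvScanA_esc]
      exact ih (by intro a hx; exact hc a (by simp [hx]))
  | case3 r1 hh =>
    have hfree : ∀ x ∈ r1, decide (x ≠ '}') = true := by
      intro x hx; exact decide_eq_true (hc x (by simp [hx]))
    have hh2 : (r1 ++ '}' :: rest).head? ≠ some '{' := by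
      rcases r1 with _ | ⟨y, ys⟩
      · simp
      · simp only [List.cons_append, List.head?_cons] at hh ⊢; exact hh
    rw [List.cons_append,
        pvScanA_open_some (r1 ++ '}' :: rest) '}' rest hh2
          (by rw [List.dropWhile_append_of_pos hfree]; simp),
        List.takeWhile_append_of_pos hfree]
    simp
  | case4 a r1 ha ih =>
    rw [List.cons_append, pvScanA_skip _ _ ha]
    exact ih (by intro x hx; exact hc x (by simp [hx]))

theorem pvScanA_lastChunk (c : List Char) (hc : ∀ a ∈ c, a ≠ '}') :
    pvScanA c = match pvFieldC c with | none => some [] | some _ => none := by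
  fun_induction pvFieldC c with
  | case1 => rw [pvScanA_nil]
  | case2 r1 hh ih =>
    rcases r1 with _ | ⟨x, xs⟩
    · simp at hh
    · simp only [List.head?_cons, Option.some.injEq] at hh
      subst hh
      simp only [List.tail_cons] at ih ⊢
      rw [pvScanA_esc]
      exact ih (by intro a hx; exact hc a (by simp [hx]))
  | case3 r1 hh =>
    have hfree : ∀ x ∈ r1, decide (x ≠ '}') = true := by
      intro x hx; exact decide_eq_true (hc x (by simp [hx]))
    rw [pvScanA_open_none r1 hh (List.dropWhile_eq_nil_iff.mpr hfree)]
  | case4 a r1 ha ih =>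
    rw [pvScanA_skip _ _ ha]
    exact ih (by intro x hx; exact hc x (by simp [hx]))

-- ---- pvSplitCh: structure lemmas ----

theorem pvSplitCh_ne_nil (sep : Char) (cs : List Char) : pvSplitCh sep cs ≠ [] := by
  cases cs with
  | nil => simp [pvSplitCh]
  | cons a r =>
    rw [pvSplitCh]
    split
    · simp
    · split <;> simp

theorem pvSplitCh_free (sep : Char) (cs : List Char) :
    ∀ p ∈ pvSplitCh sep cs, sep ∉ p := by
  induction cs with
  | nil => simp [pvSplitCh]
  | cons a r ih =>
    rw [pvSplitCh]
    split
    · intro p hp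
      rcases List.mem_cons.mp hp with hp | hp
      · simp [hp]
      · exact ih p hp
    · rename_i ha
      rcases hsr : pvSplitCh sep r with _ | ⟨h, t⟩
      · exact absurd hsr (pvSplitCh_ne_nil sep r)
      · intro p hp
        rcases List.mem_cons.mp hp with hp | hp
        · subst hp
          intro hmem
          rcases List.mem_cons.mp hmem with hmem | hmem
          · exact ha hmem.symm
          · exact ih h (by rw [hsr]; simp) hmem
        · exact ih p (by rw [hsr]; simp [hp])

theorem pvSplitCh_sep_free (sep : Char) (cs : List Char) (h : sep ∉ cs) :
    pvSplitCh sep cs = [cs] := by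
  induction cs with
  | nil => rfl
  | cons a r ih =>
    rw [pvSplitCh]
    rw [if_neg (by intro hx; exact h (by simp [hx]))]
    rw [ih (by intro hx; exact h (by simp [hx]))]

theorem pvSplitCh_append (sep : Char) (c rest : List Char) (hc : sep ∉ c) :
    pvSplitCh sep (c ++ sep :: rest) = c :: pvSplitCh sep rest := by
  induction c with
  | nil => rw [List.nil_append, pvSplitCh, if_pos rfl]
  | cons a r ih =>
    rw [List.cons_append, pvSplitCh]
    rw [if_neg (by intro hx; exact hc (by simp [hx]))]
    rw [ih (by intro hx; exact hc (by simp [hx]))]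

theorem pvSplitCh_reconstruct (sep : Char) (cs : List Char) (h : List Char)
    (t : List (List Char)) (heq : pvSplitCh sep cs = h :: t) :
    cs = h ++ (t.map (sep :: ·)).flatten := by
  induction cs generalizing h t with
  | nil =>
    rw [pvSplitCh] at heq
    cases heq
    simp
  | cons a r ih =>
    rw [pvSplitCh] at heq
    split at heq
    · rename_i ha
      cases heq
      rcases hsr : pvSplitCh sep r with _ | ⟨h', t'⟩
      · exact absurd hsr (pvSplitCh_ne_nil sep r)
      · subst ha
        simp only [List.nil_append, List.map_cons, List.flatten_cons]
        rw [ih h' t' hsr]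
        simp
    · rename_i ha
      rcases hsr : pvSplitCh sep r with _ | ⟨h', t'⟩
      · exact absurd hsr (pvSplitCh_ne_nil sep r)
      · rw [hsr] at heq
        cases heq
        simp only [List.cons_append, List.cons.injEq, true_and]
        exact ih _ _ hsr

-- ---- L2: the scanner over the '}'-chunk decomposition ----

theorem pvScanA_chunks (cs : List Char) :
    pvScanA cs =
      (if (pvFieldC ((pvSplitCh '}' cs).getLastD [])).isSome then none
       else some ((pvSplitCh '}' cs).dropLast.filterMap pvFieldC)) := by
  induction hn : cs.length using Nat.strong_induction_on generalizing cs with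
  | _ n ih =>
  by_cases hmem : '}' ∈ cs
  · -- cs = T ++ '}' :: R
    set T := cs.takeWhile (· ≠ '}') with hT
    have hTfree : ∀ a ∈ T, a ≠ '}' := by
      intro a ha
      simpa using List.mem_takeWhile_imp ha
    have hDW : cs.dropWhile (· ≠ '}') ≠ [] := by
      intro hx
      have := List.dropWhile_eq_nil_iff.mp hx '}' hmem
      simp at this
    rcases hdw : cs.dropWhile (· ≠ '}') with _ | ⟨b, R⟩
    · exact absurd hdw hDW
    have hb : b = '}' := by
      have := List.head?_dropWhile_not (· ≠ '}') cs
      rw [hdw] at this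
      simpa using this
    subst hb
    have hsplit : cs = T ++ '}' :: R := by
      conv_lhs => rw [← List.takeWhile_append_dropWhile (p := (· ≠ '}')) (l := cs)]
      rw [hdw, hT]
    have hTnot : '}' ∉ T := by intro hx; exact hTfree '}' hx rfl
    have hRlen : R.length < n := by
      have := congrArg List.length hsplit
      simp at this
      omega
    rcases hspl : pvSplitCh '}' R with _ | ⟨h', t'⟩
    · exact absurd hspl (pvSplitCh_ne_nil '}' R)
    rw [hsplit, pvScanA_chunk T R hTfree, pvSplitCh_append '}' T R hTnot, hspl]
    have hIH := ih R.length hRlen R rfl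
    rw [hspl] at hIH
    simp only [List.getLastD_cons] at hIH ⊢
    by_cases hlast : (pvFieldC (t'.getLastD h')).isSome
    · rw [if_pos hlast] at hIH ⊢
      rw [hIH]
      cases pvFieldC T <;> rfl
    · rw [if_neg hlast] at hIH ⊢
      rw [hIH]
      cases hfc : pvFieldC T
      · simp [hfc]
      · simp [hfc]
  · have hfree : ∀ a ∈ cs, a ≠ '}' := by intro a ha hx; subst hx; exact hmem ha
    rw [pvSplitCh_sep_free '}' cs hmem, pvScanA_lastChunk cs hfree]
    cases hfc : pvFieldC cs <;> simp [hfc]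

-- ---- pvRun facts ----

theorem pvRun_facts (ps : List (List Char)) (k : Nat) (hk1 : 1 ≤ k) (hk : k ≤ ps.length) :
    pvRun ps k ≤ ps.length ∧
    (∀ t, k ≤ t → t < pvRun ps k → ps[t - 1]! = []) ∧
    (pvRun ps k = ps.length ∨ ps[pvRun ps k - 1]! ≠ []) := by
  fun_induction pvRun ps k with
  | case1 k h ih =>
    obtain ⟨h1, h2⟩ := h
    obtain ⟨ih1, ih2, ih3⟩ := ih (by omega) (by omega)
    refine ⟨ih1, ?_, ih3⟩
    intro t ht1 ht2
    by_cases htk : t = k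
    · subst htk; exact h2
    · exact ih2 t (by omega) ht2
  | case2 k h =>
    rw [not_and_or] at h
    constructor
    · exact hk
    constructor
    · intro t ht1 ht2; omega
    · rcases h with h | h
      · exact Or.inl (by omega)
      · exact Or.inr h

-- ---- pvIC and fieldC on brace runs ----

-- the brace interleaving: pvIC [p1,…,pk] = '{' ++ p1 ++ '{' ++ p2 ++ … (each piece preceded by '{')
def pvIC (ps : List (List Char)) : List Char := (ps.map ('{' :: ·)).flatten

theorem pvIC_cons (q : List Char) (qs : List (List Char)) :
    pvIC (q :: qs) = '{' :: (q ++ pvIC qs) := by simp [pvIC]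

theorem pvIC_append (a b : List (List Char)) : pvIC (a ++ b) = pvIC a ++ pvIC b := by
  simp [pvIC]

theorem pvIC_replicate (n : Nat) : pvIC (List.replicate n []) = List.replicate n '{' := by
  induction n with
  | zero => rfl
  | succ m ih => simp only [List.replicate_succ, pvIC_cons, ih, List.nil_append]

theorem pvIntercalate_ic (q : List Char) (qs : List (List Char)) :
    List.intercalate ['{'] (q :: qs) = q ++ pvIC qs := by
  induction qs generalizing q with
  | nil => simp [List.intercalate, pvIC]
  | cons b t ih =>
    rw [show List.intercalate ['{'] (q :: b :: t) = q ++ ['{'] ++ List.intercalate ['{'] (b :: t) by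
          simp [List.intercalate],
        ih b, pvIC_cons]
    simp

theorem pvFieldC_replicate_even (k : Nat) (X : List Char) :
    pvFieldC (List.replicate (2 * k) '{' ++ X) = pvFieldC X := by
  induction k with
  | zero => simp
  | succ m ih =>
    have : 2 * (m + 1) = (2 * m) + 1 + 1 := by omega
    rw [this, List.replicate_succ, List.replicate_succ, List.cons_append, List.cons_append,
        pvFieldC_esc, ih]

theorem pvFieldC_free_append (p X : List Char) (hp : '{' ∉ p) :
    pvFieldC (p ++ X) = pvFieldC X := by
  induction p with
  | nil => rfl
  | cons a r ih =>
    rw [List.cons_append, pvFieldC_skip _ _ (by intro hx; exact hp (by simp [hx]))]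
    exact ih (by intro hx; exact hp (by simp [hx]))

-- ---- F: the run-parity scan equals fieldC on the brace-interleaving ----

theorem pvScanRuns_fieldC (ps : List (List Char)) (hfree : ∀ p ∈ ps, '{' ∉ p) :
    pvFieldC (pvIC ps) = pvScanRuns ps := by
  induction hn : ps.length using Nat.strong_induction_on generalizing ps with
  | _ n ih =>
  by_cases hne : ps = []
  · subst hne
    rw [show pvScanRuns [] = none by rw [pvScanRuns]; simp]
    simp [pvIC, pvFieldC]
  have hlenpos : 0 < ps.length := List.length_pos_iff.mpr hne
  obtain ⟨hR1, hR2, hR3⟩ := pvRun_facts ps 1 (by omega) (by omega)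
  set r := pvRun ps 1 with hr
  have hr1 : 1 ≤ r := pvRun_ge ps 1
  -- the first r-1 pieces are empty
  have htake : ps.take (r - 1) = List.replicate (r - 1) [] := by
    have hlen : (ps.take (r - 1)).length = r - 1 := by
      rw [List.length_take]
      exact Nat.min_eq_left (by omega)
    conv_rhs => rw [← hlen]
    apply List.eq_replicate_of_mem
    intro x hx
    obtain ⟨i, hi, hxe⟩ := List.mem_iff_getElem.mp hx
    have hilen : i < r - 1 := by rw [hlen] at hi; exact hi
    have hips : i < ps.length := by omega
    rw [List.getElem_take] at hxe
    have h2 := hR2 (i + 1) (by omega) (by omega)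
    rw [show i + 1 - 1 = i by omega, getElem!_pos ps i hips] at h2
    rw [← hxe]
    exact h2
  have hdropne : ps.drop (r - 1) ≠ [] := by
    intro hx
    have := congrArg List.length hx
    simp at this
    omega
  rcases hdr : ps.drop (r - 1) with _ | ⟨q, qs⟩
  · exact absurd hdr hdropne
  have hic : pvIC ps = List.replicate r '{' ++ (q ++ pvIC qs) := by
    conv_lhs => rw [← List.take_append_drop (r - 1) ps]
    rw [pvIC_append, htake, pvIC_replicate, hdr, pvIC_cons]
    rw [show List.replicate r '{' = List.replicate (r - 1) '{' ++ ['{'] by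
          rw [← List.replicate_succ']
          congr 1
          omega]
    simp
  have hqfree : '{' ∉ q := hfree q (by
    have : q ∈ ps.drop (r - 1) := by rw [hdr]; simp
    exact List.mem_of_mem_drop this)
  -- head of (q ++ pvIC qs) is not '{'
  have hhead : (q ++ pvIC qs).head? ≠ some '{' := by
    rcases hq : q with _ | ⟨c, cr⟩
    · -- q = []: then qs = [] (run stopped only at end)
      have hqs : qs = [] := by
        rcases hR3 with hR3 | hR3
        · have hlq := congrArg List.length hdr
          simp at hlq
          exact List.eq_nil_of_length_eq_zero (by omega)
        · exfalso
          have hrlen : r - 1 < ps.length := by omega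
          have hq2 : ps[r - 1]! = q := by
            rw [getElem!_pos ps (r - 1) hrlen]
            have h3 : (ps.drop (r - 1)).head? = some q := by rw [hdr]; rfl
            rw [List.head?_drop] at h3
            rw [List.getElem?_eq_getElem hrlen] at h3
            exact Option.some.inj h3
          rw [hq] at hq2
          exact hR3 hq2
      subst hqs hq
      simp [pvIC]
    · subst hq
      simp only [List.cons_append, List.head?_cons]
      intro hx
      simp only [Option.some.injEq] at hx
      exact hqfree (by simp [hx])
  have hunfold : pvScanRuns ps =
      (if r % 2 = 1 then some (List.intercalate ['{'] (ps.drop (r - 1)))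
       else pvScanRuns (ps.drop r)) := by
    conv_lhs => rw [pvScanRuns]
    rw [dif_neg hne]
  rw [hic, hunfold]
  rcases Nat.even_or_odd r with he | ho
  · obtain ⟨m, hm⟩ := he
    have hdropr : ps.drop r = qs := by
      have h1 : ps.drop r = (ps.drop (r - 1)).drop 1 := by
        rw [List.drop_drop]; congr 1; omega
      rw [h1, hdr]; simp
    rw [if_neg (by omega : ¬ r % 2 = 1), hdropr]
    rw [show r = 2 * m by omega]
    rw [pvFieldC_replicate_even, pvFieldC_free_append q _ hqfree]
    have hqs_free : ∀ p ∈ qs, '{' ∉ p := by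
      intro p hp
      apply hfree
      have : p ∈ ps.drop (r - 1) := by rw [hdr]; simp [hp]
      exact List.mem_of_mem_drop this
    have hdecr : qs.length < n := by
      have := congrArg List.length hdr
      simp at this
      omega
    exact ih qs.length hdecr qs hqs_free rfl
  · obtain ⟨m, hm⟩ := ho
    rw [if_pos (by omega : r % 2 = 1), hdr, pvIntercalate_ic]
    rw [show r = 2 * m + 1 by omega, List.replicate_succ', List.append_assoc,
        pvFieldC_replicate_even]
    show pvFieldC ('{' :: (q ++ pvIC qs)) = some (q ++ pvIC qs)
    exact pvFieldC_open _ hhead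

-- ---- B's field equals the char-level field ----

theorem pvFieldB_eq (c : List Char) : pvFieldB c = pvFieldC c := by
  rcases hs : pvSplitCh '{' c with _ | ⟨h, t⟩
  · exact absurd hs (pvSplitCh_ne_nil '{' c)
  have hrec := pvSplitCh_reconstruct '{' c h t hs
  have hfree := pvSplitCh_free '{' c
  have hhfree : '{' ∉ h := hfree h (by rw [hs]; simp)
  have htfree : ∀ p ∈ t, '{' ∉ p := by
    intro p hp
    exact hfree p (by rw [hs]; simp [hp])
  rw [pvFieldB, hs]
  simp only [List.drop_one, List.tail_cons]
  rw [← pvScanRuns_fieldC t htfree, show pvIC t = (t.map ('{' :: ·)).flatten from rfl]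
  conv_rhs => rw [hrec]
  rw [pvFieldC_free_append _ _ hhfree]

-- ---- assembly: the two ports agree on every input ----

theorem pvPortsEqual (text : String) : get_argnames_py text = get_argnames_py_alt text := by
  unfold get_argnames_py get_argnames_py_alt
  rw [pvLoopA_scanA text.toList 0 [], List.drop_zero, pvScanA_chunks text.toList]
  have hfb : ∀ c : List Char, pvFieldB c = pvFieldC c := pvFieldB_eq
  by_cases hlast : (pvFieldC ((pvSplitCh '}' text.toList).getLastD [])).isSome
  · rw [if_pos hlast, if_pos (by rw [hfb]; exact hlast)]
    rfl
  · rw [if_neg hlast, if_neg (by rw [hfb]; exact hlast)]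
    simp only [Option.map_some, List.nil_append]
    congr 1
    rw [List.filterMap_congr (by intro c _; exact (hfb c).symm)]
-- ===== VERDICT (by name: the statement is the Claim_ definition above) =====
theorem get_argnames_py_spec : Claim_equal_get_argnames_py := by
  intro text _ _
  unfold Spec_get_argnames_py
  exact pvPortsEqual text
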